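-- pv_equiv track=rewrite | github.com/elektito/qbee | qbee/utils.py | convert_index_to_line_col
-- ===== SOURCE A (Python) =====
-- def convert_index_to_line_col(text, offset):
--     """
-- Convert an index into a text to a (line, column) pair. The returned
-- values are 1-based.
--     """
--
--     line = 1
--     col = 0
--     for idx, char in enumerate(text):
--         if idx == offset:
--             break
--
--         if char == '\n':
--             line += 1
--             col = 1
--             continue
--
--         col += 1
--     else:
--         return None, None
--
--     return line, col
-- ===== SOURCE B (Python) =====
-- def convert_index_to_line_col(text, offset):
--     """
-- Convert an index into a text to a (line, column) pair. The returned
-- values are 1-based.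
--     """
--     if offset < 0 or offset >= len(text):
--         return None, None
--     line = text.count('\n', 0, offset) + 1
--     p = text.rfind('\n', 0, offset)
--     col = offset if p == -1 else offset - p
--     return line, col
-- ===== Notes on version B (the rewrite author's own statement) =====
-- stated objective: faster
-- what changed: Replaced the stateful char-by-char enumerate loop with a bounds check plus two library scans: str.count('\n',0,offset) for the line and str.rfind('\n',0,offset) for the column, combined arithmetically.
import Mathlib
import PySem

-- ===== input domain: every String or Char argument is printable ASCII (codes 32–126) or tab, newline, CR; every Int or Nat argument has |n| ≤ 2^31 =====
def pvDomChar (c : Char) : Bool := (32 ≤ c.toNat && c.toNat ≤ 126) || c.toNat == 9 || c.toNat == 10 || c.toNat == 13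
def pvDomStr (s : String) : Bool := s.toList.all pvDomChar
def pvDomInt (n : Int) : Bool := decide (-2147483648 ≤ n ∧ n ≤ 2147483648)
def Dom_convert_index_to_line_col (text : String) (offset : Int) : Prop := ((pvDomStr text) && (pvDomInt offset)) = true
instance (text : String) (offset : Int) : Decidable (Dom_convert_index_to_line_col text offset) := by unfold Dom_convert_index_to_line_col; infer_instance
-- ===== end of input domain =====

-- B drops A's stateful enumerate loop in favour of a bounds check plus count/rfind on the prefix (constant-factor faster in Python, measured).

-- ===== PORT A =====
-- the for/else loop over enumerate(text) with state (line, col); list exhausted without break → (None, None)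
def convIdxGoA (offset : Int) : List Char → Nat → Int → Int → Option Int × Option Int
  | [], _, _, _ => (none, none)
  | c :: rest, idx, line, col =>
    if (idx : Int) = offset then (some line, some col)
    else if c = '\n' then convIdxGoA offset rest (idx + 1) (line + 1) 1
    else convIdxGoA offset rest (idx + 1) line (col + 1)

def convert_index_to_line_col (text : String) (offset : Int) : Option Int × Option Int :=
  convIdxGoA offset text.toList 0 1 0

-- ===== PORT B =====
-- text.rfind('\n', 0, offset) on the prefix list: last index of '\n', or -1
def pyRfindNl (l : List Char) : Int :=
  match l.reverse.idxOf? '\n' with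
  | some j => (l.length : Int) - 1 - j
  | none => -1

def convert_index_to_line_col_alt (text : String) (offset : Int) : Option Int × Option Int :=
  let cs := text.toList
  if offset < 0 ∨ (cs.length : Int) ≤ offset then (none, none)
  else
    let pre := cs.take offset.toNat
    let line : Int := (pre.count '\n' : Int) + 1
    let p := pyRfindNl pre
    let col : Int := if p = -1 then offset else offset - p
    (some line, some col)

-- ===== PRECONDITION & SPEC =====
def Spec_convert_index_to_line_col (text : String) (offset : Int) (out : Option Int × Option Int) : Prop := out = convert_index_to_line_col_alt text offset
instance (text : String) (offset : Int) (out : Option Int × Option Int) : Decidable (Spec_convert_index_to_line_col text offset out) := by unfold Spec_convert_index_to_line_col; infer_instance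

-- ===== CLAIM (what is proved, stated in full; the proofs are below) =====
def Claim_equal_convert_index_to_line_col : Prop := ∀ (text : String) (offset : Int), Dom_convert_index_to_line_col text offset → Spec_convert_index_to_line_col text offset (convert_index_to_line_col text offset)

-- ===== LEMMAS AND PROOFS =====

-- closed-form model of A's loop, the bridge between the two ports
def convIdxModel (offset : Int) (l : List Char) (idx : Nat) (line col : Int) : Option Int × Option Int :=
  if offset < idx ∨ (idx : Int) + l.length ≤ offset then (none, none)
  else
    let pre := l.take (offset - idx).toNat
    match pre.reverse.idxOf? '\n' with
    | some j => (some (line + pre.count '\n'), some ((j : Int) + 1))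
    | none => (some line, some (col + ((offset - idx).toNat : Int)))

theorem idxOf?_append_singleton (m : List Char) (c : Char) :
    (m ++ [c]).idxOf? '\n' =
      match m.idxOf? '\n' with
      | some j => some j
      | none => if c = '\n' then some m.length else none := by
  induction m with
  | nil => by_cases h : c = '\n' <;> simp [List.idxOf?_cons, h]
  | cons a t ih =>
    by_cases h : a = '\n'
    · simp [List.idxOf?_cons, h]
    · simp only [List.cons_append, List.idxOf?_cons]
      have hb : (a == '\n') = false := by simp [h]
      simp only [hb, if_false, ih]
      cases ht : t.idxOf? '\n' <;> by_cases hc : c = '\n' <;> simp [hc]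

theorem not_mem_of_idxOf?_reverse_none (m : List Char) (h : m.reverse.idxOf? '\n' = none) :
    '\n' ∉ m := by
  intro hm
  rw [List.idxOf?_eq_none_iff] at h
  exact h (by simpa using hm)

theorem convIdxGoA_eq_model (offset : Int) :
    ∀ (l : List Char) (idx : Nat) (line col : Int),
      convIdxGoA offset l idx line col = convIdxModel offset l idx line col := by
  intro l
  induction l with
  | nil =>
    intro idx line col
    simp only [convIdxGoA, convIdxModel]
    rw [if_pos]
    rcases lt_or_ge offset (idx : Int) with h | h
    · exact Or.inl h
    · right; simpa using h
  | cons c rest ih =>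
    intro idx line col
    by_cases he : (idx : Int) = offset
    · simp only [convIdxGoA, convIdxModel, if_pos he]
      rw [if_neg]
      · have : (offset - idx).toNat = 0 := by omega
        simp [this, List.idxOf?]
      · push_neg
        constructor <;> [omega; (simp; omega)]
    · have hsub1 : (offset - (idx + 1 : Nat)).toNat = (offset - idx).toNat - 1 := by
        push_cast; omega
      by_cases hr : offset < idx ∨ (idx : Int) + (c :: rest).length ≤ offset
      · -- out of range: both sides are (none, none)
        have step : ∀ line' col' : Int, convIdxModel offset rest (idx + 1) line' col' = (none, none) := by
          intro line' col'
          unfold convIdxModel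
          rw [if_pos]
          simp at hr ⊢; omega
        have goal : convIdxModel offset (c :: rest) idx line col = (none, none) := by
          unfold convIdxModel; rw [if_pos hr]
        rw [goal]
        by_cases hc : c = '\n' <;>
          simp only [convIdxGoA, if_neg he, hc, if_true, if_false, ih, step]
      · push_neg at hr
        have hr2 : (idx : Int) ≤ offset ∧ offset < (idx : Int) + (rest.length : Int) + 1 := by
          simp at hr; omega
        have hk : 1 ≤ (offset - idx).toNat := by omega
        have hkle : (offset - idx).toNat - 1 ≤ rest.length := by omega
        have hpre : (c :: rest).take (offset - idx).toNat
            = c :: rest.take ((offset - idx).toNat - 1) := by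
          obtain ⟨k, hkk⟩ : ∃ k, (offset - idx).toNat = k + 1 :=
            ⟨_, (Nat.succ_pred_eq_of_pos hk).symm⟩
          simp [hkk]
        have hlenpre : (rest.take ((offset - idx).toNat - 1)).length = (offset - idx).toNat - 1 := by
          simp [List.length_take]; omega
        by_cases hc : c = '\n'
        · subst hc
          rw [show convIdxGoA offset ('\n' :: rest) idx line col
                = convIdxGoA offset rest (idx + 1) (line + 1) 1 by simp [convIdxGoA, he]]
          rw [ih]
          unfold convIdxModel
          rw [if_neg (by simp; omega), if_neg (by simp; omega)]
          simp only [hsub1, hpre]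
          rw [List.reverse_cons, idxOf?_append_singleton]
          cases hj : (rest.take ((offset - idx).toNat - 1)).reverse.idxOf? '\n' with
          | some j => simp [hj, List.count_cons]; ring
          | none =>
            have hnm := not_mem_of_idxOf?_reverse_none _ hj
            have heq : (offset - (idx : Int)).toNat = offset.toNat - idx := by omega
            rw [heq] at hnm
            simp [List.count_eq_zero_of_not_mem hnm]
            omega
        · rw [show convIdxGoA offset (c :: rest) idx line col
                = convIdxGoA offset rest (idx + 1) line (col + 1) by simp [convIdxGoA, he, hc]]
          rw [ih]
          unfold convIdxModel
          rw [if_neg (by simp; omega), if_neg (by simp; omega)]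
          simp only [hsub1, hpre]
          rw [List.reverse_cons, idxOf?_append_singleton]
          cases hj : (rest.take ((offset - idx).toNat - 1)).reverse.idxOf? '\n' with
          | some j => simp [hj, List.count_cons, hc]
          | none => simp [hj, List.count_cons, hc]; omega

-- ===== VERDICT (by name: the statement is the Claim_ definition above) =====
theorem convert_index_to_line_col_spec : Claim_equal_convert_index_to_line_col := by
  intro text offset _
  unfold Spec_convert_index_to_line_col
  unfold convert_index_to_line_col convert_index_to_line_col_alt
  rw [convIdxGoA_eq_model]
  unfold convIdxModel pyRfindNl
  simp only [Nat.cast_zero, sub_zero]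
  by_cases hr : offset < 0 ∨ (text.toList.length : Int) ≤ offset
  · rw [if_pos, if_pos hr]
    simpa using hr
  · push_neg at hr
    rw [if_neg (by push_neg; omega), if_neg (by push_neg; simpa using hr)]
    have hlenN : (text.toList.take offset.toNat).length = offset.toNat := by
      rw [List.length_take]; omega
    have hlen : ((text.toList.take offset.toNat).length : Int) = offset := by
      rw [hlenN]; omega
    cases hj : (text.toList.take offset.toNat).reverse.idxOf? '\n' with
    | some j =>
      obtain ⟨hjlt, -⟩ := List.idxOf?_eq_some_iff.mp hj
      have hjlt' : j < (text.toList.take offset.toNat).length := by simpa using hjlt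
      simp only [hj]
      rw [if_neg (by omega)]
      simp only [Prod.mk.injEq, Option.some.injEq]
      exact ⟨by ring, by omega⟩
    | none =>
      have hnm := not_mem_of_idxOf?_reverse_none _ hj
      simp [hj, List.count_eq_zero_of_not_mem hnm]
      omega
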